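-- pv_equiv track=rewrite | github.com/onjik/coding_test_practice | python/boj/p1891_사분면.py | code_to_coor
-- ===== SOURCE A (Python) =====
-- def code_to_coor(code):
--     # 일의 자리 부터 순서대로 더해 간다
--     dx = [0, 1, 0, 0, 1]
--     dy = [0, 0, 0, 1, 1]
--
--     x,y = 0,0
--
--     radix = 1
--     while code > 0:
--         r = code % 10
--         code = code // 10
--         x, y = x + dx[r] * radix, y + dy[r] * radix
--         radix *= 2
--
--     return x, y
-- ===== SOURCE B (Python) =====
-- def code_to_coor(code):
--     # Horner's scheme over digits most-significant-first, realized by recursion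
--     # on code // 10; no radix accumulator.
--     dx = [0, 1, 0, 0, 1]
--     dy = [0, 0, 0, 1, 1]
--     if code <= 0:
--         return 0, 0
--     x, y = code_to_coor(code // 10)
--     d = code % 10
--     return 2 * x + dx[d], 2 * y + dy[d]
-- ===== Notes on version B (the rewrite author's own statement) =====
-- stated objective: alternative
-- what changed: Replaces the least-significant-first while loop with an explicit radix (power-of-two) accumulator by a most-significant-first Horner recursion on code // 10 (x = 2*x + dx[d]), dropping the radix variable entirely.
import Mathlib
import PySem

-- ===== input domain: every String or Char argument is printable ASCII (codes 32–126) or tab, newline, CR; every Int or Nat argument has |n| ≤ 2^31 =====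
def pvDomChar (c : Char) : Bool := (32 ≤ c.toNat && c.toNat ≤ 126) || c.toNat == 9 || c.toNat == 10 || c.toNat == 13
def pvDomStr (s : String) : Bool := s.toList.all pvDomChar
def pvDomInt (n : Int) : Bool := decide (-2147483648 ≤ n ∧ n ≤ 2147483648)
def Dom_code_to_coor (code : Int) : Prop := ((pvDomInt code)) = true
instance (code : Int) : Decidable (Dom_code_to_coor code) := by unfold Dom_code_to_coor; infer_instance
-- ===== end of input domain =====

-- B replaces A's least-significant-first loop with a radix accumulator by a
-- most-significant-first Horner recursion on code // 10 (return value only; no mutation).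

-- ===== PORT A =====
def pvDx : List Int := [0, 1, 0, 0, 1]
def pvDy : List Int := [0, 0, 0, 1, 1]

-- the while loop of A, state (code, x, y, radix); dx[r]/dy[r] via pyGetD
-- (Pre_ guarantees r ≤ 4, the in-range case, so the default is never used)
def ctcGo (code x y radix : Int) : Int × Int :=
  if 0 < code then
    let r := PySem.Int.mod code 10
    ctcGo (PySem.Int.floordiv code 10)
      (x + PySem.List.pyGetD pvDx r 0 * radix)
      (y + PySem.List.pyGetD pvDy r 0 * radix)
      (radix * 2)
  else (x, y)
termination_by code.toNat
decreasing_by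
  rw [PySem.Int.floordiv_eq_ediv_of_pos (by omega : (0:Int) < 10)]
  omega

def code_to_coor (code : Int) : Int × Int := ctcGo code 0 0 1

-- ===== PORT B =====
def code_to_coor_alt (code : Int) : Int × Int :=
  if code ≤ 0 then (0, 0)
  else
    let p := code_to_coor_alt (PySem.Int.floordiv code 10)
    let d := PySem.Int.mod code 10
    (2 * p.1 + PySem.List.pyGetD pvDx d 0, 2 * p.2 + PySem.List.pyGetD pvDy d 0)
termination_by code.toNat
decreasing_by
  rw [PySem.Int.floordiv_eq_ediv_of_pos (by omega : (0:Int) < 10)]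
  omega

-- ===== PRECONDITION & SPEC =====
-- Pre_ excludes exactly the inputs where Python A raises IndexError:
-- a positive code containing a decimal digit ≥ 5 (dx/dy have only indices 0..4).
def Pre_code_to_coor (code : Int) : Prop :=
  code ≤ 0 ∨ ∀ d ∈ Nat.digits 10 code.toNat, d ≤ 4
instance (code : Int) : Decidable (Pre_code_to_coor code) := by
  unfold Pre_code_to_coor; infer_instance

def pvWitness_code_to_coor : Int := 1423

def Spec_code_to_coor (code : Int) (out : Int × Int) : Prop := out = code_to_coor_alt code
instance (code : Int) (out : Int × Int) : Decidable (Spec_code_to_coor code out) := by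
  unfold Spec_code_to_coor; infer_instance

-- ===== CLAIM (what is proved, stated in full; the proofs are below) =====
def Claim_equal_code_to_coor : Prop :=
  ∀ (code : Int), Dom_code_to_coor code → Pre_code_to_coor code →
    Spec_code_to_coor code (code_to_coor code)

-- ===== LEMMAS AND PROOFS =====

-- loop invariant: A's accumulator loop equals x/y plus radix times B's Horner value
theorem ctcGo_eq_alt (code x y radix : Int) :
    ctcGo code x y radix =
      (x + radix * (code_to_coor_alt code).1, y + radix * (code_to_coor_alt code).2) := by
  fun_induction ctcGo code x y radix with
  | case1 code x y radix h r ih =>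
    rw [ih]
    conv_rhs => rw [code_to_coor_alt]
    rw [if_neg (by omega : ¬ code ≤ 0)]
    simp only [Prod.mk.injEq]
    simp only [show r = PySem.Int.mod code 10 from rfl]
    constructor <;> ring
  | case2 code x y radix h =>
    rw [code_to_coor_alt, if_pos (by omega)]
    simp

-- ===== VERDICT (by name: the statement is the Claim_ definition above) =====
theorem code_to_coor_spec : Claim_equal_code_to_coor := by
  intro code _ _
  unfold Spec_code_to_coor code_to_coor
  rw [ctcGo_eq_alt]
  simp
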